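-- pv_equiv track=rewrite | github.com/sunovivid/Problem-Solving | Codeforces - CodeCraft-22 and Codeforces Round 795 Div 2/B_Shoe_Shuffling.py | answer
-- ===== SOURCE A (Python) =====
-- import itertools
-- from collections import deque
-- from typing import Dict
--
-- def answer(a):
--     groups = tuple(len(tuple(v)) for k, v in itertools.groupby(sorted(a)))
--     if any((len_v == 1 for len_v in groups)):
--         yield -1
--         return
--
--     size_indices: Dict[deque] = {}
--     for i, size in enumerate(a):
--         size_indices.setdefault(size, deque()).append(i)
--
--     for indices in size_indices.values():
--         indices.rotate(1)
--
--     for size in a: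
--         yield size_indices[size].popleft() + 1
-- ===== SOURCE B (Python) =====
-- def answer(a):
--     last = {}
--     count = {}
--     for i, v in enumerate(a):
--         last[v] = i
--         count[v] = count.get(v, 0) + 1
--     if any(c == 1 for c in count.values()):
--         return [-1]
--     out = []
--     for i, v in enumerate(a):
--         out.append(last[v] + 1)
--         last[v] = i
--     return out
-- ===== Notes on version B (the rewrite author's own statement) =====
-- stated objective: faster
-- what changed: Replaced sort+groupby singleton detection and rotated-deque popping by two linear passes over a counting/last-occurrence dict: the answer at each position is the previous occurrence index (cyclically) of its value.
import Mathlib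
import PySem

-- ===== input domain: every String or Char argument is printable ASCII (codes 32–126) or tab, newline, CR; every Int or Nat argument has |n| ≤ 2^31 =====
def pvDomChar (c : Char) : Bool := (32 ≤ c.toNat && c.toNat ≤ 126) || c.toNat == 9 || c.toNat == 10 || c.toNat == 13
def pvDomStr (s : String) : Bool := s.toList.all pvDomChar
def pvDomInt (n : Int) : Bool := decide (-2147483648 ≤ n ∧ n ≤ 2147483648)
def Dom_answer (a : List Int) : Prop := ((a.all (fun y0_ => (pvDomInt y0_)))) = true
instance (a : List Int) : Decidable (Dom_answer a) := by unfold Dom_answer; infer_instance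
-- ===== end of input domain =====

-- B replaces A's sort+groupby singleton check and rotated-deque popping by two linear
-- passes over last-occurrence/count dicts (objective: faster).

-- ===== PORT A =====
-- lengths of the runs produced by itertools.groupby (as Python ints)
def pyGroupLens : List Int → List Int
  | [] => []
  | x :: xs => (1 + ((xs.takeWhile (· == x)).length : Int)) :: pyGroupLens (xs.dropWhile (· == x))
  termination_by l => l.length
  decreasing_by
    have := List.length_dropWhile_le (p := (· == x)) (l := xs)
    simp only [List.length_cons]
    omega

-- deque.rotate(1): move the last element to the front
def pyRotate1 (l : List Int) : List Int :=
  match l.reverse with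
  | [] => []
  | x :: rest => x :: rest.reverse

-- size_indices: dict of deques, built with setdefault(size, deque()).append(i)
def pySizeIndices (a : List Int) : PySem.Dict Int (List Int) :=
  (PySem.List.enumerate a 0).foldl (fun d p => d.modify p.2 [] (· ++ [p.1])) PySem.Dict.empty

-- for indices in size_indices.values(): indices.rotate(1)
def pyRotated (a : List Int) : PySem.Dict Int (List Int) :=
  PySem.Dict.mk ((pySizeIndices a).items.map (fun p => (p.1, pyRotate1 p.2)))

-- one iteration of 'for size in a: yield size_indices[size].popleft() + 1'
def pyPopStep (s : PySem.Dict Int (List Int) × List Int) (v : Int) :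
    PySem.Dict Int (List Int) × List Int :=
  match s.1.get? v with
  | some (h :: t) => (s.1.insert v t, s.2 ++ [h + 1])
  | _ => (s.1, s.2 ++ [0])   -- unreachable: in A the deque is never empty when popped

def answer (a : List Int) : List Int :=
  if (pyGroupLens (PySem.List.sorted a (fun x => x) false)).any (fun len_v => len_v == 1) then
    [-1]
  else
    (a.foldl pyPopStep (pyRotated a, [])).2

-- ===== PORT B =====
-- first loop: last[v] = i; count[v] = count.get(v, 0) + 1
def bScan (a : List Int) : PySem.Dict Int Int × PySem.Dict Int Int :=
  (PySem.List.enumerate a 0).foldl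
    (fun s p => (s.1.insert p.2 p.1, s.2.insert p.2 (s.2.getD p.2 0 + 1)))
    (PySem.Dict.empty, PySem.Dict.empty)

def answer_alt (a : List Int) : List Int :=
  if (bScan a).2.values.any (fun c => c == 1) then
    [-1]
  else
    -- second loop: out.append(last[v] + 1); last[v] = i
    ((PySem.List.enumerate a 0).foldl
      (fun s p => (s.1.insert p.2 p.1, s.2 ++ [s.1.getD p.2 0 + 1]))
      ((bScan a).1, [])).2

-- ===== PRECONDITION & SPEC =====
def Spec_answer (a : List Int) (out : List Int) : Prop := out = answer_alt a
instance (a : List Int) (out : List Int) : Decidable (Spec_answer a out) := by unfold Spec_answer; infer_instance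

-- ===== CLAIM (what is proved, stated in full; the proofs are below) =====
def Claim_equal_answer : Prop := ∀ (a : List Int), Dom_answer a → Spec_answer a (answer a)

-- ===== LEMMAS AND PROOFS =====

-- occurrence indices of v in a, as enumerate produces them
def pyOcc (a : List Int) (v : Int) : List Int :=
  ((PySem.List.enumerate a 0).filter (fun p => p.2 == v)).map (·.1)

theorem dict_getD_eq {ν : Type} (d : PySem.Dict Int ν) (k : Int) (dflt : ν) :
    d.getD k dflt = (d.get? k).getD dflt := rfl

theorem rot1_eq (l : List Int) (h : l ≠ []) : pyRotate1 l = l.getLast h :: l.dropLast := by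
  rcases List.eq_nil_or_concat l with rfl | ⟨ys, y, rfl⟩
  · exact absurd rfl h
  · simp [pyRotate1]

theorem mapVal_get? (f : List Int → List Int) (items : List (Int × List Int)) (v : Int) :
    (PySem.Dict.mk (items.map (fun p => (p.1, f p.2)))).get? v
      = ((PySem.Dict.mk items).get? v).map f := by
  induction items with
  | nil => rfl
  | cons p items ih =>
    obtain ⟨k, w⟩ := p
    simp only [List.map_cons, PySem.Dict.get?_mk_cons]
    cases h : (k == v) with
    | false => simp [ih]
    | true => simp

theorem occ_ne_nil (a : List Int) (v : Int) (hv : v ∈ a) : pyOcc a v ≠ [] := by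
  have hv' : v ∈ (PySem.List.enumerate a 0).map (·.2) := by
    rw [PySem.List.map_snd_enumerate]; exact hv
  obtain ⟨p, hp, hpv⟩ := List.mem_map.mp hv'
  intro hnil
  have hf : p ∈ (PySem.List.enumerate a 0).filter (fun p => p.2 == v) :=
    List.mem_filter.mpr ⟨hp, by simp [hpv]⟩
  have : p.1 ∈ pyOcc a v := List.mem_map_of_mem hf
  rw [hnil] at this
  cases this

theorem sizeIndices_getD (a : List Int) (v : Int) :
    (pySizeIndices a).getD v [] = pyOcc a v := by
  have hswap : ∀ (l : List (Int × Int)) (d : PySem.Dict Int (List Int)),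
      l.foldl (fun d p => d.modify p.2 [] (· ++ [p.1])) d
        = (l.map (fun p => (p.2, p.1))).foldl (fun d p => d.modify p.1 [] (· ++ [p.2])) d := by
    intro l
    induction l with
    | nil => intro d; rfl
    | cons p l ih => intro d; simp only [List.map_cons, List.foldl_cons]; exact ih _
  unfold pySizeIndices
  rw [hswap]
  rw [PySem.Dict.getD_foldl_modify_append]
  simp [pyOcc, List.filter_map, List.map_map, Function.comp_def]

theorem sizeIndices_get? (a : List Int) (v : Int) (hv : v ∈ a) :
    (pySizeIndices a).get? v = some (pyOcc a v) := by
  have hD := sizeIndices_getD a v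
  rw [dict_getD_eq] at hD
  cases h : (pySizeIndices a).get? v with
  | none => rw [h] at hD; exact absurd hD.symm (occ_ne_nil a v hv)
  | some w => rw [h] at hD; simp only [Option.getD_some] at hD; rw [hD]

theorem lastDict_getD : ∀ (l : List (Int × Int)) (d : PySem.Dict Int Int) (v : Int),
    (l.foldl (fun d p => d.insert p.2 p.1) d).getD v 0
      = (((l.filter (fun p => p.2 == v)).map (·.1)).getLast?).getD (d.getD v 0) := by
  intro l
  induction l with
  | nil => intro d v; rfl
  | cons p l ih =>
    intro d v
    simp only [List.foldl_cons, List.filter_cons]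
    by_cases h : p.2 = v
    · subst h
      simp only [BEq.rfl, if_true]
      rw [ih]
      rw [PySem.Dict.getD_insert, if_pos rfl]
      rcases List.eq_nil_or_concat ((l.filter (fun q => q.2 == p.2)).map (·.1)) with hnil | ⟨ys, y, hcc⟩
      · rw [List.map_cons, hnil]; simp
      · rw [List.map_cons, hcc, List.concat_eq_append]
        rw [List.getLast?_concat]
        rw [show p.1 :: (ys ++ [y]) = (p.1 :: ys) ++ [y] from rfl, List.getLast?_concat]
        simp
    · have hb : (p.2 == v) = false := by simp [h]
      simp only [hb, Bool.false_eq_true, if_false]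
      rw [ih]
      rw [PySem.Dict.getD_insert, if_neg (fun hh => h hh.symm)]

theorem foldl_pair : ∀ (l : List (Int × Int)) (x y : PySem.Dict Int Int),
    l.foldl (fun s p => (s.1.insert p.2 p.1, s.2.insert p.2 (s.2.getD p.2 0 + 1))) (x, y)
      = (l.foldl (fun d p => d.insert p.2 p.1) x,
         l.foldl (fun d p => d.insert p.2 (d.getD p.2 0 + 1)) y) := by
  intro l
  induction l with
  | nil => intro x y; rfl
  | cons p l ih => intro x y; simp only [List.foldl_cons]; exact ih _ _

theorem countD_eq (a : List Int) :
    (PySem.List.enumerate a 0).foldl (fun d p => d.insert p.2 (d.getD p.2 0 + 1)) PySem.Dict.empty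
      = PySem.Dict.counter a := by
  have h : ∀ (l : List (Int × Int)) (d : PySem.Dict Int Int),
      l.foldl (fun d p => d.insert p.2 (d.getD p.2 0 + 1)) d
        = (l.map (·.2)).foldl (fun d x => d.insert x (d.getD x 0 + 1)) d := by
    intro l
    induction l with
    | nil => intro d; rfl
    | cons p l ih => intro d; simp only [List.map_cons, List.foldl_cons]; exact ih _
  rw [h, PySem.List.map_snd_enumerate, PySem.Dict.foldl_insert_getD_add_one_eq_counter]

theorem bScan_eq (a : List Int) :
    bScan a = ((PySem.List.enumerate a 0).foldl (fun d p => d.insert p.2 p.1) PySem.Dict.empty,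
               PySem.Dict.counter a) := by
  unfold bScan
  rw [foldl_pair, countD_eq]

theorem counter_any (a : List Int) :
    ((PySem.Dict.counter a : PySem.Dict Int Int).values.any (fun c => c == 1) = true)
      ↔ ∃ v : Int, a.count v = 1 := by
  simp only [PySem.Dict.values, PySem.Dict.items_counter, List.map_map, List.any_eq_true,
    List.mem_map, Function.comp_def]
  constructor
  · rintro ⟨c, ⟨v, hv, rfl⟩, hc⟩
    refine ⟨v, ?_⟩
    have : ((a.count v : Int)) = 1 := by simpa using hc
    exact_mod_cast this
  · rintro ⟨v, hv⟩
    refine ⟨(a.count v : Int), ⟨v, ?_, rfl⟩, by simp [hv]⟩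
    exact (PySem.Set.mem_ofList _ _).mpr (List.count_pos_iff.mp (by omega))

theorem dropWhile_head_false (p : Int → Bool) :
    ∀ (l : List Int) (y : Int) (t : List Int), l.dropWhile p = y :: t → p y = false := by
  intro l
  induction l with
  | nil => intro y t h; simp at h
  | cons x l ih =>
    intro y t h
    cases hx : p x with
    | true => rw [List.dropWhile_cons, hx] at h; exact ih y t (by simpa using h)
    | false =>
      rw [List.dropWhile_cons, hx] at h
      simp only [Bool.false_eq_true, if_false, List.cons.injEq] at h
      rw [← h.1]; exact hx

theorem gl_any : ∀ (s : List Int), s.Pairwise (· ≤ ·) →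
    (((pyGroupLens s).any (fun v => v == 1)) = true ↔ ∃ v : Int, s.count v = 1) := by
  intro s
  induction s using pyGroupLens.induct with
  | case1 => intro _; simp [pyGroupLens]
  | case2 x xs ih =>
    intro hp
    have hxs := List.takeWhile_append_dropWhile (p := fun y => y == x) (l := xs)
    have hxle : ∀ y ∈ xs, x ≤ y := (List.pairwise_cons.mp hp).1
    have hpxs : xs.Pairwise (· ≤ ·) := (List.pairwise_cons.mp hp).2
    have hrp : (xs.dropWhile (· == x)).Pairwise (· ≤ ·) := hpxs.sublist (List.dropWhile_sublist _)
    have hner : ∀ z ∈ xs.dropWhile (· == x), z ≠ x := by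
      cases hdw : xs.dropWhile (· == x) with
      | nil => intro z hz; simp at hz
      | cons y t =>
        have hy : (y == x) = false := dropWhile_head_false _ xs y t hdw
        have hymem : y ∈ xs := (List.dropWhile_sublist (· == x)).subset (hdw ▸ List.mem_cons_self ..)
        have hyx : x < y := lt_of_le_of_ne (hxle y hymem) (Ne.symm (by simpa using hy))
        intro z hz
        rcases List.mem_cons.mp hz with rfl | hz'
        · exact ne_of_gt hyx
        · have hyz : y ≤ z := (List.pairwise_cons.mp (hdw ▸ hrp)).1 z hz'
          exact ne_of_gt (lt_of_lt_of_le hyx hyz)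
    have hcx : (x :: xs).count x = 1 + (xs.takeWhile (· == x)).length := by
      have h1 : (xs.takeWhile (· == x)).count x = (xs.takeWhile (· == x)).length :=
        List.count_eq_length.mpr (fun b hb => (beq_iff_eq.mp (List.mem_takeWhile_imp (p := fun y => y == x) hb)).symm)
      have h2 : (xs.dropWhile (· == x)).count x = 0 :=
        List.count_eq_zero.mpr (fun h => (hner x h) rfl)
      have h3 : List.count x xs = (xs.takeWhile (· == x)).length := by
        conv_lhs => rw [← hxs]
        rw [List.count_append, h1, h2]
        omega
      rw [List.count_cons_self, h3]
      omega
    have hcv : ∀ v : Int, v ≠ x →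
        (x :: xs).count v = (xs.dropWhile (· == x)).count v := by
      intro v hv
      have h1 : (xs.takeWhile (· == x)).count v = 0 :=
        List.count_eq_zero.mpr (fun h => hv (beq_iff_eq.mp (List.mem_takeWhile_imp (p := fun y => y == x) h)))
      have h2 : List.count v (x :: xs) = List.count v xs := by
        simp [List.count_cons, show (x == v) = false from by simp [Ne.symm hv]]
      rw [h2]
      conv_lhs => rw [← hxs]
      rw [List.count_append, h1]
      omega
    rw [pyGroupLens]
    rw [List.any_cons]
    constructor
    · intro h
      rcases Bool.or_eq_true_iff.mp h with h1 | h2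
      · have hlen : (xs.takeWhile (· == x)).length = 0 := by
          have := beq_iff_eq.mp h1
          omega
        exact ⟨x, by rw [hcx, hlen]⟩
      · obtain ⟨v, hv⟩ := (ih hrp).mp h2
        have hvx : v ≠ x := by
          intro hvx
          subst hvx
          have : (xs.dropWhile (· == v)).count v = 0 :=
            List.count_eq_zero.mpr (fun h => (hner v h) rfl)
          omega
        exact ⟨v, by rw [hcv v hvx]; exact hv⟩
    · rintro ⟨v, hv⟩
      apply Bool.or_eq_true_iff.mpr
      by_cases hvx : v = x
      · subst hvx
        rw [hcx] at hv
        have : (xs.takeWhile (· == v)).length = 0 := by omega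
        left
        simp [this]
      · right
        exact (ih hrp).mpr ⟨v, by rw [← hcv v hvx]; exact hv⟩

theorem loop_eq : ∀ (l : List (Int × Int)) (dA : PySem.Dict Int (List Int))
    (dB : PySem.Dict Int Int) (acc : List Int),
    (∀ v, v ∈ l.map (·.2) →
      dA.get? v = some (dB.getD v 0 :: ((l.filter (fun p => p.2 == v)).map (·.1)).dropLast)) →
    (l.foldl (fun s p => pyPopStep s p.2) (dA, acc)).2
      = (l.foldl (fun s p => (s.1.insert p.2 p.1, s.2 ++ [s.1.getD p.2 0 + 1])) (dB, acc)).2 := by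
  intro l
  induction l with
  | nil => intro dA dB acc _; rfl
  | cons p l ih =>
    intro dA dB acc hinv
    obtain ⟨i, v⟩ := p
    have hv := hinv v (by simp)
    have hfilter : (((i, v) :: l) : List (Int × Int)).filter (fun p => p.2 == v)
        = (i, v) :: l.filter (fun p => p.2 == v) := by simp
    rw [hfilter, List.map_cons] at hv
    simp only [List.foldl_cons]
    cases hrest : (l.filter (fun p => p.2 == v)).map (·.1) with
    | nil =>
      rw [hrest] at hv
      rw [show (i :: ([] : List Int)).dropLast = ([] : List Int) from rfl] at hv
      have hnomem : ∀ u, u ∈ l.map (·.2) → u ≠ v := by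
        intro u hu huv
        subst huv
        obtain ⟨q, hq, hq2⟩ := List.mem_map.mp hu
        have hqf : q ∈ l.filter (fun p => p.2 == u) := List.mem_filter.mpr ⟨hq, by simp [hq2]⟩
        have : q.1 ∈ (l.filter (fun p => p.2 == u)).map (·.1) := List.mem_map_of_mem hqf
        rw [hrest] at this
        cases this
      show (l.foldl (fun s p => pyPopStep s p.2) (pyPopStep (dA, acc) v)).2 = _
      rw [show pyPopStep (dA, acc) v = (dA.insert v [], acc ++ [dB.getD v 0 + 1]) from by
        simp [pyPopStep, hv]]
      refine ih _ _ _ ?_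
      intro u hu
      have huv : u ≠ v := hnomem u hu
      have h0 := hinv u (by simp [hu])
      have hfu : (((i, v) :: l) : List (Int × Int)).filter (fun p => p.2 == u)
          = l.filter (fun p => p.2 == u) := by
        simp [show (v == u) = false from by simp [Ne.symm huv]]
      rw [hfu] at h0
      rw [PySem.Dict.get?_insert, if_neg huv, PySem.Dict.getD_insert, if_neg huv]
      exact h0
    | cons r rs =>
      rw [hrest] at hv
      rw [show (i :: r :: rs).dropLast = i :: (r :: rs).dropLast from rfl] at hv
      show (l.foldl (fun s p => pyPopStep s p.2) (pyPopStep (dA, acc) v)).2 = _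
      rw [show pyPopStep (dA, acc) v
          = (dA.insert v (i :: (r :: rs).dropLast), acc ++ [dB.getD v 0 + 1]) from by
        simp [pyPopStep, hv]]
      refine ih _ _ _ ?_
      intro u hu
      by_cases huv : u = v
      · subst huv
        rw [PySem.Dict.get?_insert, if_pos rfl, PySem.Dict.getD_insert, if_pos rfl, hrest]
      · have h0 := hinv u (by simp [hu])
        have hfu : (((i, v) :: l) : List (Int × Int)).filter (fun p => p.2 == u)
            = l.filter (fun p => p.2 == u) := by
          simp [show (v == u) = false from by simp [Ne.symm huv]]
        rw [hfu] at h0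
        rw [PySem.Dict.get?_insert, if_neg huv, PySem.Dict.getD_insert, if_neg huv]
        exact h0

theorem foldA_en (a : List Int) (s : PySem.Dict Int (List Int) × List Int) :
    a.foldl pyPopStep s = (PySem.List.enumerate a 0).foldl (fun s p => pyPopStep s p.2) s := by
  conv_lhs => rw [← PySem.List.map_snd_enumerate a 0]
  rw [List.foldl_map]

theorem answer_eq (a : List Int) : answer a = answer_alt a := by
  have hcond : (pyGroupLens (PySem.List.sorted a (fun x => x) false)).any (fun len_v => len_v == 1)
      = (bScan a).2.values.any (fun c => c == 1) := by
    rw [bScan_eq]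
    rw [Bool.eq_iff_iff]
    rw [gl_any _ (PySem.List.sorted_pairwise a (fun x => x)), counter_any]
    constructor
    · rintro ⟨v, hv⟩
      exact ⟨v, by rw [← (PySem.List.sorted_perm a (fun x => x) false).count_eq]; exact hv⟩
    · rintro ⟨v, hv⟩
      exact ⟨v, by rw [(PySem.List.sorted_perm a (fun x => x) false).count_eq]; exact hv⟩
  unfold answer answer_alt
  rw [hcond]
  cases hc : (bScan a).2.values.any (fun c => c == 1) with
  | true => rw [if_pos rfl, if_pos rfl]
  | false =>
    rw [if_neg (by simp), if_neg (by simp)]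
    rw [foldA_en]
    refine loop_eq (PySem.List.enumerate a 0) _ _ [] ?_
    intro v hv
    rw [PySem.List.map_snd_enumerate] at hv
    have hocc : pyOcc a v ≠ [] := occ_ne_nil a v hv
    have h1 : (pyRotated a).get? v = some (pyRotate1 (pyOcc a v)) := by
      show (PySem.Dict.mk ((pySizeIndices a).items.map (fun p => (p.1, pyRotate1 p.2)))).get? v = _
      rw [mapVal_get?]
      rw [show PySem.Dict.mk (pySizeIndices a).items = pySizeIndices a from rfl]
      rw [sizeIndices_get? a v hv]
      rfl
    have h2 : (bScan a).1.getD v 0 = (pyOcc a v).getLast hocc := by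
      rw [bScan_eq]
      show ((PySem.List.enumerate a 0).foldl (fun d p => d.insert p.2 p.1)
        PySem.Dict.empty).getD v 0 = _
      rw [lastDict_getD]
      rw [show ((PySem.List.enumerate a 0).filter (fun p => p.2 == v)).map (·.1) = pyOcc a v from rfl]
      rw [List.getLast?_eq_some_getLast hocc]
      rfl
    rw [h1, h2, rot1_eq (pyOcc a v) hocc]
    rfl

-- ===== VERDICT (by name: the statement is the Claim_ definition above) =====
theorem answer_spec : Claim_equal_answer := by
  intro a _
  exact (answer_eq a)
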